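-- pv_equiv track=rewrite | github.com/ChocolateXmas/Python-Proj | Projects/Mathematical/Triangle/triangle.py | txtloop
-- ===== SOURCE A (Python) =====
-- def txtloop(txt, times, startIndex):
--     tmp_st = ""
--     for i in range(0, times):
--         if startIndex == len(txt)-1:
--             tmp_st += txt[startIndex]
--             startIndex = 0
--         else:
--             tmp_st += txt[startIndex]
--             startIndex += 1
--     return tmp_st, startIndex
-- ===== SOURCE B (Python) =====
-- def txtloop(txt, times, startIndex):
--     if times <= 0:
--         return "", startIndex
--     n = len(txt)
--     s = startIndex % n
--     reps = (s + times + n - 1) // n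
--     res = (txt * reps)[s:s + times]
--     end = startIndex + times
--     if end >= n:
--         end %= n
--     return res, end
-- ===== Notes on version B (the rewrite author's own statement) =====
-- stated objective: faster
-- what changed: replaces A's per-character loop with wrap branch by bulk slicing of a repeated string plus a closed-form modular computation of the final index
import Mathlib
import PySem

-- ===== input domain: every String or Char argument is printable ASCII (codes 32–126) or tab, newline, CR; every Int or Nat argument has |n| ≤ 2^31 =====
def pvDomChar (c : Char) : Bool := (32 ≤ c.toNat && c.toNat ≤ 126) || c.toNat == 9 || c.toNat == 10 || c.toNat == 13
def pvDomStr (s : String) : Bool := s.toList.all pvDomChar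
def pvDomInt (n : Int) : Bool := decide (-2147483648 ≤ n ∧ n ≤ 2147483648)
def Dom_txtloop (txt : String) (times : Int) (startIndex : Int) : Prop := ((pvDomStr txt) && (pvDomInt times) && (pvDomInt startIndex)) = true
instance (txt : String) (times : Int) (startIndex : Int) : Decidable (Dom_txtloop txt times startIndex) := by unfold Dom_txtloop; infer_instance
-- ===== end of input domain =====

-- B replaces A's per-character loop (with its explicit wrap branch) by bulk slicing of a
-- repeated string plus a closed-form modular computation of the final index; return-value
-- equivalence only (neither version mutates its arguments).

-- ===== PORT A =====
-- the for-loop of A: fuel = remaining iterations, acc = tmp_st (as chars), idx = startIndex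
def txtloopGo (l : List Char) (fuel : Nat) (acc : List Char) (idx : Int) : List Char × Int :=
  match fuel with
  | 0 => (acc, idx)
  | t + 1 =>
    match PySem.List.pyGet? l idx with
    | none => (acc, idx)   -- IndexError in Python; such inputs are outside Pre_txtloop
    | some c =>
      if idx = (l.length : Int) - 1 then
        txtloopGo l t (acc ++ [c]) 0
      else
        txtloopGo l t (acc ++ [c]) (idx + 1)

def txtloop (txt : String) (times : Int) (startIndex : Int) : String × Int :=
  let r := txtloopGo txt.toList times.toNat [] startIndex
  (String.ofList r.1, r.2)

-- ===== PORT B =====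
def txtloop_alt (txt : String) (times : Int) (startIndex : Int) : String × Int :=
  if times ≤ 0 then ("", startIndex)
  else
    let l := txt.toList
    let n : Int := l.length
    let s := PySem.Int.mod startIndex n
    let reps := PySem.Int.floordiv (s + times + n - 1) n
    let full := (List.replicate reps.toNat l).flatten      -- txt * reps
    let res := PySem.List.slice full (some s) (some (s + times))
    let e0 := startIndex + times
    let e := if e0 ≥ n then PySem.Int.mod e0 n else e0
    (String.ofList res, e)

-- ===== PRECONDITION & SPEC =====
-- Pre_ excludes exactly the inputs where A raises: times > 0 with an empty txt or a
-- startIndex outside Python's index range (IndexError).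
def Pre_txtloop (txt : String) (times : Int) (startIndex : Int) : Prop :=
  times ≤ 0 ∨ (txt.toList ≠ [] ∧ -(txt.toList.length : Int) ≤ startIndex ∧ startIndex < (txt.toList.length : Int))
instance (txt : String) (times : Int) (startIndex : Int) : Decidable (Pre_txtloop txt times startIndex) := by unfold Pre_txtloop; infer_instance

def pvWitness_txtloop : String × Int × Int := ("ab", 3, 0)

def Spec_txtloop (txt : String) (times : Int) (startIndex : Int) (out : String × Int) : Prop := out = txtloop_alt txt times startIndex
instance (txt : String) (times : Int) (startIndex : Int) (out : String × Int) : Decidable (Spec_txtloop txt times startIndex out) := by unfold Spec_txtloop; infer_instance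

-- ===== CLAIM (what is proved, stated in full; the proofs are below) =====
def Claim_equal_txtloop : Prop := ∀ (txt : String) (times : Int) (startIndex : Int), Dom_txtloop txt times startIndex → Pre_txtloop txt times startIndex → Spec_txtloop txt times startIndex (txtloop txt times startIndex)

-- ===== LEMMAS AND PROOFS =====

-- the cyclic character sequence starting at (virtual) index v, for t steps
def cyc (l : List Char) (v : Int) : Nat → List Char
  | 0 => []
  | t + 1 => l.getD (v % (l.length : Int)).toNat 'a' :: cyc l (v + 1) t

-- the final index of A's loop after t steps from v (v may be negative)
def fin' (v n : Int) (t : Nat) : Int := if v + t < n then v + t else (v + t) % n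

theorem cyc_length (l : List Char) : ∀ (t : Nat) (v : Int), (cyc l v t).length = t := by
  intro t
  induction t with
  | zero => intro v; rfl
  | succ t ih => intro v; simp [cyc, ih]

theorem cyc_congr (l : List Char) : ∀ (t : Nat) (v w : Int),
    v % (l.length : Int) = w % (l.length : Int) → cyc l v t = cyc l w t := by
  intro t
  induction t with
  | zero => intro v w _; rfl
  | succ t ih =>
    intro v w h
    simp only [cyc, h]
    congr 1
    apply ih
    rw [Int.add_emod, h, ← Int.add_emod]

theorem pyGet?_eq_cyc_head (l : List Char) (v : Int) (hn : l ≠ [])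
    (h1 : -(l.length : Int) ≤ v) (h2 : v < (l.length : Int)) :
    PySem.List.pyGet? l v = some (l.getD (v % (l.length : Int)).toNat 'a') := by
  have hn0 : 0 < l.length := List.length_pos_iff.mpr hn
  rcases le_or_gt 0 v with hv | hv
  · have hm : v % (l.length : Int) = v := Int.emod_eq_of_lt hv h2
    rw [PySem.List.pyGet?_eq_some_getElem l hv h2, hm, List.getD_eq_getElem]
  · have hm : v % (l.length : Int) = v + l.length := by
      have : (v + (l.length:Int)) % (l.length : Int) = v % (l.length : Int) := by
        have h := Int.add_mul_emod_self_left (a := v) (b := (l.length : Int)) (c := 1)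
        simpa using h
      rw [← this, Int.emod_eq_of_lt (by omega) (by omega)]
    have hlt : l.length - (-v).toNat < l.length := by omega
    have hget : PySem.List.pyGet? l v = l[l.length - (-v).toNat]? := by
      conv_lhs => rw [show v = -(((-v).toNat : Nat) : Int) from by omega]
      exact PySem.List.pyGet?_neg_natCast l _ (by omega) (by omega)
    rw [hget, List.getElem?_eq_getElem hlt, hm]
    congr 1
    rw [List.getD_eq_getElem]
    · congr 1
      omega
    · omega

theorem fin'_shift (v n : Int) (t : Nat) : fin' (v + 1) n t = fin' v n (t + 1) := by
  unfold fin'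
  have h : v + ((t : Int) + 1) = v + 1 + t := by ring
  push_cast
  rw [h]

theorem fin'_wrap (n : Int) (hn : 0 < n) (t : Nat) : fin' 0 n t = fin' (n - 1) n (t + 1) := by
  unfold fin'
  push_cast
  have h1 : n - 1 + ((t : Int) + 1) = (t : Int) + n * 1 := by ring
  rw [h1, Int.add_mul_emod_self_left, zero_add]
  have e2 : 0 ≤ (t : Int) % n := Int.emod_nonneg _ (by omega)
  have e3 : (t : Int) % n < n := Int.emod_lt_of_pos _ (by omega)
  have e4 : (t : Int) < n → (t : Int) % n = (t : Int) := fun h => Int.emod_eq_of_lt (by omega) h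
  by_cases hc : (t : Int) < n
  · rw [if_pos hc, if_neg (by omega), e4 hc]
  · rw [if_neg hc, if_neg (by omega)]

theorem txtloopGo_eq (l : List Char) (hn : l ≠ []) : ∀ (t : Nat) (v : Int) (acc : List Char),
    -(l.length : Int) ≤ v → v < (l.length : Int) →
    txtloopGo l t acc v = (acc ++ cyc l v t, fin' v l.length t) := by
  have hn0 : 0 < l.length := List.length_pos_iff.mpr hn
  intro t
  induction t with
  | zero =>
    intro v acc h1 h2
    simp [txtloopGo, cyc, fin']
    omega
  | succ t ih =>
    intro v acc h1 h2
    rw [txtloopGo]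
    simp only [pyGet?_eq_cyc_head l v hn h1 h2]
    by_cases hw : v = (l.length : Int) - 1
    · rw [if_pos hw, ih 0 _ (by omega) (by omega), Prod.mk.injEq]
      constructor
      · rw [List.append_assoc, List.singleton_append]
        congr 1
        simp only [cyc]
        congr 1
        apply cyc_congr
        rw [hw, show ((l.length : Int) - 1 + 1) = (l.length : Int) from by ring,
          Int.emod_self, Int.zero_emod]
      · rw [hw]
        exact fin'_wrap _ (by omega) t
    · rw [if_neg hw, ih (v + 1) _ (by omega) (by omega), Prod.mk.injEq]
      constructor
      · simp [cyc]
      · exact fin'_shift v _ t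

theorem flatten_replicate_getElem? (l : List Char) (hn : l ≠ []) :
    ∀ (r j : Nat), j < r * l.length →
    ((List.replicate r l).flatten)[j]? = l[j % l.length]? := by
  have hn0 : 0 < l.length := List.length_pos_iff.mpr hn
  intro r
  induction r with
  | zero => intro j hj; omega
  | succ r ih =>
    intro j hj
    rw [Nat.succ_mul] at hj
    rw [List.replicate_succ, List.flatten_cons]
    by_cases hj1 : j < l.length
    · rw [List.getElem?_append_left hj1, Nat.mod_eq_of_lt hj1]
    · have hge : l.length ≤ j := by omega
      rw [List.getElem?_append_right hge, ih (j - l.length) (by omega)]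
      congr 1
      conv_rhs => rw [show j = l.length + (j - l.length) from by omega]
      rw [Nat.add_mod_left]

theorem cyc_getElem? (l : List Char) : ∀ (t i : Nat) (v : Int), i < t →
    (cyc l v t)[i]? = some (l.getD ((v + i) % (l.length : Int)).toNat 'a') := by
  intro t
  induction t with
  | zero => intro i v hi; omega
  | succ t ih =>
    intro i v hi
    match i with
    | 0 => simp [cyc]
    | i + 1 =>
      have := ih i (v + 1) (by omega)
      simp only [cyc, List.getElem?_cons_succ, this]
      congr 3
      push_cast
      ring

theorem cyc_eq_slice (l : List Char) (hn : l ≠ []) (s t r : Nat)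
    (hs : s < l.length) (hr : s + t ≤ r * l.length) :
    cyc l (s : Int) t = (((List.replicate r l).flatten).drop s).take t := by
  have hn0 : 0 < l.length := List.length_pos_iff.mpr hn
  apply List.ext_getElem?
  intro i
  by_cases hi : i < t
  · rw [cyc_getElem? l t i s hi]
    rw [List.getElem?_take, if_pos hi, List.getElem?_drop]
    rw [flatten_replicate_getElem? l hn r (s + i) (by omega)]
    have hlt : (s + i) % l.length < l.length := Nat.mod_lt _ hn0
    rw [List.getElem?_eq_getElem hlt]
    have hcast : ((((s : Int) + (i : Nat)) % (l.length : Int))).toNat = (s + i) % l.length := by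
      have h : ((s : Int) + (i : Nat)) = (((s + i : Nat) : Int)) := by push_cast; ring
      rw [h, ← Int.natCast_mod]
      omega
    rw [hcast, List.getD_eq_getElem]
  · have h1 : (cyc l (s : Int) t)[i]? = none := by
      rw [List.getElem?_eq_none_iff, cyc_length]
      omega
    have h2 : ((((List.replicate r l).flatten).drop s).take t)[i]? = none := by
      rw [List.getElem?_eq_none_iff]
      simp only [List.length_take, List.length_drop]
      omega
    rw [h1, h2]

theorem alt_pos (txt : String) (times startIndex : Int) (ht : ¬ times ≤ 0) :
    txtloop_alt txt times startIndex =
      (String.ofList (PySem.List.slice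
          ((List.replicate (PySem.Int.floordiv
              (PySem.Int.mod startIndex (txt.toList.length : Int) + times + (txt.toList.length : Int) - 1)
              (txt.toList.length : Int)).toNat txt.toList).flatten)
          (some (PySem.Int.mod startIndex (txt.toList.length : Int)))
          (some (PySem.Int.mod startIndex (txt.toList.length : Int) + times))),
       if startIndex + times ≥ (txt.toList.length : Int)
         then PySem.Int.mod (startIndex + times) (txt.toList.length : Int)
         else startIndex + times) := by
  simp only [txtloop_alt, if_neg ht]

-- ===== VERDICT (by name: the statement is the Claim_ definition above) =====
theorem txtloop_spec : Claim_equal_txtloop := by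
  intro txt times startIndex _ hpre
  unfold Spec_txtloop txtloop
  by_cases ht : times ≤ 0
  · have h0 : times.toNat = 0 := by omega
    unfold txtloop_alt
    simp [h0, txtloopGo, ht]
  · rw [alt_pos txt times startIndex ht]
    rcases hpre with h | ⟨hne, h1, h2⟩
    · omega
    set l := txt.toList with hl
    have hn0 : 0 < l.length := List.length_pos_iff.mpr hne
    set n : Int := (l.length : Int) with hnn
    have hmodpos : PySem.Int.mod startIndex n = startIndex % n :=
      PySem.Int.mod_eq_emod_of_pos (by omega)
    have hfdpos : PySem.Int.floordiv (startIndex % n + times + n - 1) n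
        = (startIndex % n + times + n - 1) / n :=
      PySem.Int.floordiv_eq_ediv_of_pos (by omega)
    simp only [hmodpos, hfdpos]
    set s : Int := startIndex % n with hs
    have hs0 : 0 ≤ s := Int.emod_nonneg _ (by omega)
    have hsn : s < n := Int.emod_lt_of_pos _ (by omega)
    set reps : Int := (s + times + n - 1) / n with hreps
    have hd : n * reps + (s + times + n - 1) % n = s + times + n - 1 := by
      rw [hreps]; exact Int.mul_ediv_add_emod _ _
    have hcm : n * reps = reps * n := mul_comm _ _
    have hrep : s + times ≤ reps * n := by
      have he1 : 0 ≤ (s + times + n - 1) % n := Int.emod_nonneg _ (by omega)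
      have he2 : (s + times + n - 1) % n < n := Int.emod_lt_of_pos _ (by omega)
      omega
    have hrep0 : 0 ≤ reps := by nlinarith [hrep, hs0, ht]
    rw [txtloopGo_eq l hne times.toNat startIndex [] h1 h2, List.nil_append, Prod.mk.injEq]
    constructor
    · -- string components
      show String.ofList (cyc l startIndex times.toNat) = _
      congr 1
      rw [cyc_congr l times.toNat startIndex s (by rw [hs, Int.emod_emod_of_dvd _ dvd_rfl])]
      have hsnat : s = ((s.toNat : Nat) : Int) := by omega
      rw [hsnat, cyc_eq_slice l hne s.toNat times.toNat reps.toNat (by omega)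
        (by nlinarith [hrep, Int.toNat_of_nonneg hrep0, Int.toNat_of_nonneg hs0,
              Int.toNat_of_nonneg (le_of_lt (not_le.mp ht))])]
      rw [PySem.List.slice_toNat _ (by omega) (by omega)]
      congr 1
      omega
    · -- index components
      show fin' startIndex n times.toNat = _
      unfold fin'
      have hc : (times.toNat : Int) = times := by omega
      rw [hc]
      by_cases hcond : startIndex + times ≥ n
      · rw [if_neg (by omega), if_pos hcond, PySem.Int.mod_eq_emod_of_pos (by omega)]
      · rw [if_pos (by omega), if_neg hcond]
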